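-- pv_equiv track=rewrite | github.com/fasilmveloor/malayalam-morpho-hierarchical-tokenizer | src/bio_sandhi.py | split_to_bio
-- ===== SOURCE A (Python) =====
-- from typing import List, Tuple, Dict
--
-- BIO_TAGS = {
--     'B': 0,  # Begin morpheme
--     'I': 1,  # Inside morpheme
--     'PAD': 2  # Padding (ignored in loss)
-- }
--
-- def split_to_bio(split_positions: List[int], word_len: int) -> List[int]:
--     """
--     Convert split positions to BIO tags.
--
--     Args:
--         split_positions: Positions AFTER which a split occurs
--         word_len: Length of the word
--
--     Returns:
--         BIO tag sequence
--     """
--     bio_tags = []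
--     for i in range(word_len):
--         if i == 0:
--             bio_tags.append(BIO_TAGS['B'])  # First char always begins a morpheme
--         elif i in split_positions:
--             bio_tags.append(BIO_TAGS['B'])  # New morpheme starts
--         else:
--             bio_tags.append(BIO_TAGS['I'])  # Continue morpheme
--     return bio_tags
-- ===== SOURCE B (Python) =====
-- BIO_TAGS = {
--     'B': 0,
--     'I': 1,
--     'PAD': 2
-- }
--
-- def split_to_bio(split_positions, word_len):
--     # Scatter approach: start with all-I tags, then write B at the word start
--     # and at each in-range split position.
--     bio_tags = [BIO_TAGS['I']] * word_len
--     if word_len > 0: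
--         bio_tags[0] = BIO_TAGS['B']
--     for pos in split_positions:
--         if 0 <= pos < word_len:
--             bio_tags[pos] = BIO_TAGS['B']
--     return bio_tags
-- ===== Notes on version B (the rewrite author's own statement) =====
-- stated objective: faster
-- what changed: Instead of scanning every index and testing 'i in split_positions' (an inner list scan), B allocates an all-I tag list once and scatters B markers: one write for the word start and one write per in-range split position.
import Mathlib
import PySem

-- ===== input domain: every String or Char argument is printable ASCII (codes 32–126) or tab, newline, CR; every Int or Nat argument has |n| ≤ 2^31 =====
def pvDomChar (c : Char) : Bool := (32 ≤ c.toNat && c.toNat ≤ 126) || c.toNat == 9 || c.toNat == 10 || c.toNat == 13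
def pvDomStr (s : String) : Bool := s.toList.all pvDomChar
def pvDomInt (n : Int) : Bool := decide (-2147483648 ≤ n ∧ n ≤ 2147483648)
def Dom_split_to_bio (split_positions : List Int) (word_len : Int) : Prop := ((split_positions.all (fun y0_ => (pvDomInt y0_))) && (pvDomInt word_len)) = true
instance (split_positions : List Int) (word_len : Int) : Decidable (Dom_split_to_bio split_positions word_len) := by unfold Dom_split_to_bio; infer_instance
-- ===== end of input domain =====

-- B replaces A's per-index membership scan by a one-shot scatter of B markers (objective: faster, O(n+m) vs O(n·m)).

-- ===== PORT A =====
-- membership test 'i in split_positions' -> List.contains; the loop appends one tag per index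
def split_to_bio (split_positions : List Int) (word_len : Int) : List Int :=
  (PySem.List.pyRange 0 word_len 1).foldl
    (fun bio_tags i =>
      if i == 0 then bio_tags ++ [0]
      else if split_positions.contains i then bio_tags ++ [0]
      else bio_tags ++ [1]) []

-- ===== PORT B =====
-- '[1]*word_len' (empty for word_len ≤ 0, as in Python) then in-place writes -> List.set
def split_to_bio_alt (split_positions : List Int) (word_len : Int) : List Int :=
  let base : List Int := List.replicate word_len.toNat 1
  let tags := if 0 < word_len then base.set 0 0 else base
  split_positions.foldl
    (fun t pos => if 0 ≤ pos ∧ pos < word_len then t.set pos.toNat 0 else t) tags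

-- ===== PRECONDITION & SPEC =====
def Spec_split_to_bio (split_positions : List Int) (word_len : Int) (out : List Int) : Prop := out = split_to_bio_alt split_positions word_len
instance (split_positions : List Int) (word_len : Int) (out : List Int) : Decidable (Spec_split_to_bio split_positions word_len out) := by unfold Spec_split_to_bio; infer_instance

-- ===== CLAIM (what is proved, stated in full; the proofs are below) =====
def Claim_equal_split_to_bio : Prop := ∀ (split_positions : List Int) (word_len : Int), Dom_split_to_bio split_positions word_len → Spec_split_to_bio split_positions word_len (split_to_bio split_positions word_len)

-- ===== LEMMAS AND PROOFS =====

-- A's loop appends one tag per visited index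
theorem splitA_foldl_eq_map (sp : List Int) (l : List Int) (acc : List Int) :
    l.foldl (fun bio_tags i =>
      if i == 0 then bio_tags ++ [0]
      else if sp.contains i then bio_tags ++ [0]
      else bio_tags ++ [1]) acc
    = acc ++ l.map (fun i => if i = 0 ∨ i ∈ sp then (0 : Int) else 1) := by
  induction l generalizing acc with
  | nil => simp
  | cons x xs ih =>
    simp only [List.foldl_cons, List.map_cons, ih]
    by_cases h0 : x = 0
    · simp [h0]
    · by_cases hm : x ∈ sp
      · simp [h0, hm]
      · simp [h0, hm]

-- B's scatter loop preserves length
theorem scatter_length (wl : Int) (sp : List Int) (t : List Int) :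
    (sp.foldl (fun t pos => if 0 ≤ pos ∧ pos < wl then t.set pos.toNat 0 else t) t).length
    = t.length := by
  induction sp generalizing t with
  | nil => rfl
  | cons p ps ih =>
    simp only [List.foldl_cons]
    rw [ih]
    split <;> simp

-- element-wise description of B's scatter loop
theorem scatter_getD (wl : Int) (sp : List Int) (t : List Int) (j : Nat) (hj : j < t.length) :
    (sp.foldl (fun t pos => if 0 ≤ pos ∧ pos < wl then t.set pos.toNat 0 else t) t).getD j 0
    = if ∃ p ∈ sp, 0 ≤ p ∧ p < wl ∧ p.toNat = j then 0 else t.getD j 0 := by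
  induction sp generalizing t with
  | nil => simp
  | cons p ps ih =>
    simp only [List.foldl_cons]
    by_cases hg : 0 ≤ p ∧ p < wl
    · rw [if_pos hg, ih (t.set p.toNat 0) (by simpa using hj)]
      have hset : (t.set p.toNat 0).getD j 0 = if p.toNat = j then 0 else t.getD j 0 := by
        by_cases hpj : p.toNat = j
        · subst hpj
          simp [List.getD, hj]
        · simp [List.getD, hpj]
      rw [hset]
      by_cases hpj : p.toNat = j
      · have hx : ∃ q ∈ p :: ps, 0 ≤ q ∧ q < wl ∧ q.toNat = j := ⟨p, by simp, hg.1, hg.2, hpj⟩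
        rw [if_pos hx, if_pos hpj]
        split <;> rfl
      · rw [if_neg hpj]
        by_cases hx : ∃ q ∈ ps, 0 ≤ q ∧ q < wl ∧ q.toNat = j
        · rw [if_pos hx, if_pos (by obtain ⟨q, hq, h⟩ := hx; exact ⟨q, by simp [hq], h⟩)]
        · rw [if_neg hx, if_neg]
          rintro ⟨q, hq, h1, h2, h3⟩
          rcases List.mem_cons.mp hq with rfl | hq'
          · exact hpj h3
          · exact hx ⟨q, hq', h1, h2, h3⟩
    · rw [if_neg hg, ih t hj]
      by_cases hx : ∃ q ∈ ps, 0 ≤ q ∧ q < wl ∧ q.toNat = j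
      · rw [if_pos hx, if_pos (by obtain ⟨q, hq, h⟩ := hx; exact ⟨q, by simp [hq], h⟩)]
      · rw [if_neg hx, if_neg]
        rintro ⟨q, hq, h1, h2, h3⟩
        rcases List.mem_cons.mp hq with rfl | hq'
        · exact hg ⟨h1, h2⟩
        · exact hx ⟨q, hq', h1, h2, h3⟩

-- ===== VERDICT (by name: the statement is the Claim_ definition above) =====
theorem split_to_bio_spec : Claim_equal_split_to_bio := by
  intro sp wl _
  unfold Spec_split_to_bio split_to_bio split_to_bio_alt
  rw [splitA_foldl_eq_map, PySem.List.pyRange_one]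
  simp only [List.nil_append, List.map_map]
  set base : List Int := List.replicate wl.toNat 1 with hbase
  set tags : List Int := if 0 < wl then base.set 0 0 else base with htags
  have htlen : tags.length = wl.toNat := by
    rw [htags]; split <;> simp [hbase]
  apply List.ext_getElem
  · rw [scatter_length, htlen]
    simp
  · intro j h1 h2
    have hj : j < wl.toNat := by simpa using h1
    have hjt : j < tags.length := htlen ▸ hj
    have hwl : 0 < wl := by omega
    conv_rhs => rw [← List.getD_eq_getElem _ 0 h2]
    rw [scatter_getD wl sp tags j hjt]
    have htj : tags.getD j 0 = if j = 0 then (0 : Int) else 1 := by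
      rw [htags, if_pos hwl]
      by_cases hj0 : j = 0
      · subst hj0
        have h0 : 0 < base.length := by simp [hbase]; omega
        simp [List.getD, h0]
      · rw [if_neg hj0]
        have : (base.set 0 0).getD j 0 = base.getD j 0 := by
          simp [List.getD, List.getElem?_set_ne (fun h => hj0 h.symm)]
        rw [this, hbase]
        simp [List.getD, hj]
    rw [htj]
    simp only [List.getElem_map, List.getElem_range, Function.comp_apply, zero_add]
    have hjw : (j : Int) < wl := by omega
    by_cases hj0 : j = 0
    · subst hj0
      rw [if_pos (Or.inl (by norm_num))]
      split <;> rfl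
    · have hne : ¬((j : Int) = 0) := by omega
      by_cases hm : (j : Int) ∈ sp
      · rw [if_pos (Or.inr hm),
            if_pos (⟨(j : Int), hm, by omega, hjw, by omega⟩ :
              ∃ p ∈ sp, 0 ≤ p ∧ p < wl ∧ p.toNat = j)]
      · rw [if_neg (by rintro (h | h); exact hne h; exact hm h), if_neg, if_neg hj0]
        rintro ⟨p, hp, h1', h2', h3'⟩
        have : p = (j : Int) := by omega
        exact hm (this ▸ hp)
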